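-- pv_equiv track=rewrite | github.com/Sandroz1/main-project | task.py | funcLetter
-- ===== SOURCE A (Python) =====
-- def funcLetter(a, str1):
--     count = -1
--
--     lot = [0,0]
--     for i in range(len(str1)):
--
--         if str1[i] == a:
--             if count == -1:
--                 lot[0] = i
--                 count += 1
--             lot[1]= i
--     if(count != -1):
--         return tuple(lot)
--     else:
--         lot = [None,None]
--         return  tuple(lot)
-- ===== SOURCE B (Python) =====
-- def _scan(a, chars, start):
--     # index (counting up from start) of the first character equal to a, else None
--     i = start
--     for c in chars:
--         if c == a:
--             return i
--         i += 1
--     return None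
--
--
-- def funcLetter(a, str1):
--     first = _scan(a, str1, 0)
--     if first is None:
--         return (None, None)
--     j = _scan(a, reversed(str1), 0)
--     last = first if j is None else len(str1) - 1 - j
--     return (first, last)
-- ===== Notes on version B (the rewrite author's own statement) =====
-- stated objective: alternative
-- what changed: Replaces the single combined pass that maintains a count flag and mutates a two-slot list with two directed early-exit scans: a forward scan for the first matching position and a backward scan (over the reversed string) for the last.
import Mathlib
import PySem

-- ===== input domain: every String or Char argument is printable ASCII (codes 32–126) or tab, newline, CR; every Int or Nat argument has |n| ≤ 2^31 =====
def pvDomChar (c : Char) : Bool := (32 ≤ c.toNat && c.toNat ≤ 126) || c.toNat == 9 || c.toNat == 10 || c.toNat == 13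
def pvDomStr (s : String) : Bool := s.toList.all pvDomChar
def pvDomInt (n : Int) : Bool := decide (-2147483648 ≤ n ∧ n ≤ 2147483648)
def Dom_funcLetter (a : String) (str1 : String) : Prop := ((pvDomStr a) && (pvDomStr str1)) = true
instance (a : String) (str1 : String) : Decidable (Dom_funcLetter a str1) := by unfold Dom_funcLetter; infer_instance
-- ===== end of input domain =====

-- B replaces A's single flag-and-mutate pass with two directed early-exit scans (forward for the first index, backward over the reversed string for the last); same cost, different decomposition.

-- ===== PORT A =====
def funcLetter (a : String) (str1 : String) : Option Int × Option Int :=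
  let s := str1.toList
  let r := (PySem.List.pyRange 0 (PySem.Str.len str1) 1).foldl
    (fun (st : Int × Int × Int) i =>
      if String.mk [PySem.List.pyGetD s i ' '] = a then
        (if st.1 = -1 then (st.1 + 1, i, i) else (st.1, st.2.1, i))
      else st) (-1, 0, 0)
  if r.1 ≠ -1 then (some r.2.1, some r.2.2) else (none, none)

-- ===== PORT B =====
-- _scan: first index (counting up from `start`) whose character equals a, else None
def pvScan (a : String) : List Char → Int → Option Int
  | [], _ => none
  | c :: cs, i => if String.mk [c] = a then some i else pvScan a cs (i + 1)

def funcLetter_alt (a : String) (str1 : String) : Option Int × Option Int :=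
  let s := str1.toList
  match pvScan a s 0 with
  | none => (none, none)
  | some f =>
    match pvScan a s.reverse 0 with
    | none => (some f, some f)
    | some j => (some f, some ((s.length : Int) - 1 - j))

-- ===== PRECONDITION & SPEC =====
def Spec_funcLetter (a : String) (str1 : String) (out : Option Int × Option Int) : Prop := out = funcLetter_alt a str1
instance (a : String) (str1 : String) (out : Option Int × Option Int) : Decidable (Spec_funcLetter a str1 out) := by unfold Spec_funcLetter; infer_instance

-- ===== CLAIM (what is proved, stated in full; the proofs are below) =====
def Claim_equal_funcLetter : Prop := ∀ (a : String) (str1 : String), Dom_funcLetter a str1 → Spec_funcLetter a str1 (funcLetter a str1)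

-- ===== LEMMAS AND PROOFS =====

-- last index l of a match in the suffix (indices counted from k), default l
def pvLastU (a : String) : List Char → Int → Int → Int
  | [], _, l => l
  | c :: cs, k, l => pvLastU a cs (k + 1) (if String.mk [c] = a then k else l)

-- result of A's loop once/if it ever matches: (first index, last index)
def pvAres (a : String) : List Char → Int → Option (Int × Int)
  | [], _ => none
  | c :: cs, k =>
      if String.mk [c] = a then some (k, pvLastU a cs (k + 1) k) else pvAres a cs (k + 1)

theorem pvA1 (a : String) (s : List Char) :
    ∀ (k f l : Int),
      (PySem.List.enumerate s k).foldl
        (fun (st : Int × Int × Int) (q : Int × Char) =>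
          if String.mk [q.2] = a then
            (if st.1 = -1 then (st.1 + 1, q.1, q.1) else (st.1, st.2.1, q.1))
          else st) (0, f, l)
      = (0, f, pvLastU a s k l) := by
  induction s with
  | nil => intro k f l; simp [PySem.List.enumerate, pvLastU]
  | cons c cs ih =>
    intro k f l
    simp only [PySem.List.enumerate_cons, List.foldl_cons, pvLastU]
    by_cases h : String.mk [c] = a <;> simp [h, ih]

theorem pvA2 (a : String) (s : List Char) :
    ∀ (k x y : Int),
      (PySem.List.enumerate s k).foldl
        (fun (st : Int × Int × Int) (q : Int × Char) =>
          if String.mk [q.2] = a then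
            (if st.1 = -1 then (st.1 + 1, q.1, q.1) else (st.1, st.2.1, q.1))
          else st) (-1, x, y)
      = (match pvAres a s k with
         | none => (-1, x, y)
         | some (f, l) => (0, f, l)) := by
  induction s with
  | nil => intro k x y; simp [PySem.List.enumerate, pvAres]
  | cons c cs ih =>
    intro k x y
    simp only [PySem.List.enumerate_cons, List.foldl_cons, pvAres]
    by_cases h : String.mk [c] = a
    · simp only [h, if_pos rfl]
      norm_num
      exact pvA1 a cs (k + 1) k k
    · simp [h, ih]

theorem pvScan_shift (a : String) (s : List Char) :
    ∀ (k : Int), pvScan a s k = (pvScan a s 0).map (fun j => k + j) := by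
  induction s with
  | nil => intro k; simp [pvScan]
  | cons c cs ih =>
    intro k
    by_cases h : String.mk [c] = a
    · simp [pvScan, h]
    · simp only [pvScan, if_neg h]
      rw [ih (k + 1), ih (0 + 1)]
      cases h0 : pvScan a cs 0 <;> simp <;> ring

theorem pvLastU_append (a : String) (t : List Char) (c : Char) :
    ∀ (k l : Int),
      pvLastU a (t ++ [c]) k l
        = if String.mk [c] = a then k + t.length else pvLastU a t k l := by
  induction t with
  | nil => intro k l; simp [pvLastU]
  | cons d ds ih =>
    intro k l
    simp only [List.cons_append, pvLastU, ih, List.length_cons]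
    by_cases h : String.mk [c] = a <;> simp [h] <;> push_cast <;> ring

theorem pvAres_append (a : String) (t : List Char) (c : Char) :
    ∀ (k : Int),
      pvAres a (t ++ [c]) k
        = match pvAres a t k with
          | none => if String.mk [c] = a then some (k + t.length, k + t.length) else none
          | some (f, l) => some (f, if String.mk [c] = a then k + t.length else l) := by
  induction t with
  | nil => intro k; simp [pvAres, pvLastU]
  | cons d ds ih =>
    intro k
    simp only [List.cons_append, pvAres]
    by_cases h : String.mk [d] = a
    · simp only [if_pos h, pvLastU_append, List.length_cons]
      by_cases hc : String.mk [c] = a <;> simp [hc] <;> push_cast <;> ring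
    · simp only [if_neg h, ih, List.length_cons]
      cases h0 : pvAres a ds (k + 1) with
      | none => by_cases hc : String.mk [c] = a <;> simp [hc] <;> push_cast <;> ring
      | some p =>
        by_cases hc : String.mk [c] = a <;> simp [hc] <;> push_cast <;> ring

theorem pvScan_append (a : String) (t r : List Char) :
    ∀ (k : Int),
      pvScan a (t ++ r) k
        = match pvScan a t k with
          | some f => some f
          | none => pvScan a r (k + (t.length : Int)) := by
  induction t with
  | nil => intro k; simp [pvScan]
  | cons d ds ih =>
    intro k
    simp only [List.cons_append, pvScan]
    by_cases hd : String.mk [d] = a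
    · simp [hd]
    · simp only [if_neg hd, ih, List.length_cons]
      cases h0 : pvScan a ds (k + 1)
      · simp only [h0]; congr 1; push_cast; ring
      · simp [h0]

theorem pvScan_none_iff_pvAres_none (a : String) (t : List Char) :
    ∀ (k : Int), (pvScan a t k = none ↔ pvAres a t k = none) := by
  induction t with
  | nil => intro k; simp [pvScan, pvAres]
  | cons d ds ih =>
    intro k
    simp only [pvScan, pvAres]
    by_cases hd : String.mk [d] = a
    · simp [hd]
    · simp only [if_neg hd]; exact ih (k + 1)

-- bridge: A's combined result vs B's two scans
theorem pvBridge (a : String) (s : List Char) :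
    ∀ (k : Int),
      (match pvAres a s k with
       | none => pvScan a s.reverse 0 = none
       | some (f, l) =>
           pvScan a s k = some f ∧
           pvScan a s.reverse 0 = some ((s.length : Int) - 1 - (l - k))) := by
  induction s using List.reverseRecOn with
  | nil => intro k; simp [pvAres, pvScan]
  | append_singleton t c ih =>
    intro k
    rw [pvAres_append]
    have hlen : ((t ++ [c]).length : Int) = (t.length : Int) + 1 := by
      simp
    by_cases hc : String.mk [c] = a
    · cases h0 : pvAres a t k with
      | none =>
        have hnone : pvScan a t k = none :=
          (pvScan_none_iff_pvAres_none a t k).mpr h0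
        simp only [h0, if_pos hc]
        refine ⟨?_, ?_⟩
        · rw [pvScan_append, hnone]
          simp [pvScan, hc]
        · simp only [List.reverse_append, List.reverse_cons, List.reverse_nil,
            List.nil_append, List.cons_append, pvScan, if_pos hc]
          rw [hlen]; congr 1; ring
      | some p =>
        obtain ⟨f, l⟩ := p
        have hih := ih k; rw [h0] at hih
        simp only [h0, if_pos hc]
        refine ⟨?_, ?_⟩
        · rw [pvScan_append, hih.1]
        · simp only [List.reverse_append, List.reverse_cons, List.reverse_nil,
            List.nil_append, List.cons_append, pvScan, if_pos hc]
          rw [hlen]; congr 1; ring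
    · cases h0 : pvAres a t k with
      | none =>
        have hih := ih k; rw [h0] at hih
        simp only [if_neg hc]
        simp only [List.reverse_append, List.reverse_cons, List.reverse_nil,
          List.nil_append, List.cons_append, pvScan, if_neg hc]
        rw [pvScan_shift a t.reverse (0 + 1), hih]; rfl
      | some p =>
        obtain ⟨f, l⟩ := p
        have hih := ih k; rw [h0] at hih
        simp only [if_neg hc]
        refine ⟨?_, ?_⟩
        · rw [pvScan_append, hih.1]
        · simp only [List.reverse_append, List.reverse_cons, List.reverse_nil,
            List.nil_append, List.cons_append, pvScan, if_neg hc]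
          rw [pvScan_shift a t.reverse (0 + 1), hih.2]
          simp only [Option.map_some]
          rw [hlen]; congr 1; ring

-- A's loop computes exactly pvAres
theorem pvA_char (a : String) (str1 : String) :
    funcLetter a str1
      = match pvAres a str1.toList 0 with
        | none => (none, none)
        | some (f, l) => (some f, some l) := by
  have henum := PySem.List.enumerate_eq_map_pyRange str1.toList ' '
  simp only [PySem.List.len_eq] at henum
  have hfold :
      (PySem.List.pyRange 0 ((str1.toList.length : Int)) 1).foldl
        (fun (st : Int × Int × Int) i =>
          if String.mk [PySem.List.pyGetD str1.toList i ' '] = a then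
            (if st.1 = -1 then (st.1 + 1, i, i) else (st.1, st.2.1, i))
          else st) (-1, 0, 0)
      = (PySem.List.enumerate str1.toList 0).foldl
          (fun (st : Int × Int × Int) (q : Int × Char) =>
            if String.mk [q.2] = a then
              (if st.1 = -1 then (st.1 + 1, q.1, q.1) else (st.1, st.2.1, q.1))
            else st) (-1, 0, 0) := by
    rw [henum, List.foldl_map]
  unfold funcLetter
  simp only [PySem.Str.len_eq, hfold, pvA2 a str1.toList 0]
  cases h0 : pvAres a str1.toList 0 with
  | none => simp
  | some p => obtain ⟨f, l⟩ := p; simp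

-- ===== VERDICT (by name: the statement is the Claim_ definition above) =====
theorem funcLetter_spec : Claim_equal_funcLetter := by
  intro a str1 _
  show funcLetter a str1 = funcLetter_alt a str1
  rw [pvA_char]
  unfold funcLetter_alt
  simp only []
  have hb := pvBridge a str1.toList 0
  cases h0 : pvAres a str1.toList 0 with
  | none =>
    rw [h0] at hb
    have hnone : pvScan a str1.toList 0 = none :=
      (pvScan_none_iff_pvAres_none a str1.toList 0).mpr h0
    simp [hnone]
  | some p =>
    obtain ⟨f, l⟩ := p
    rw [h0] at hb
    simp only [hb.1, hb.2]
    have harr : ((str1.toList.length : Int)) - 1 - (((str1.toList.length : Int)) - 1 - (l - 0)) = l := by ring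
    rw [harr]
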